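-- pv_equiv track=rewrite | github.com/AmanpreetSa/esc190 | exam prep/2024.py | is_winning_position_iterative
-- ===== SOURCE A (Python) =====
-- def is_winning_position_iterative(start_position):
--     memo = {}
--
--     for pos in range(21, 25):
--         memo[pos] = (False, 0)
--
--     stack = [(start_position, False)] # (position, have_we_expanded?)
--
--     while stack:
--         pos, expanded = stack.pop()
--
--         if pos in memo:
--             continue
--
--         if not expanded:
--             stack.append((pos, True))
--             moves = [1, 2, 3]
--             for move in moves:
--                 child = pos + move
--                 if child not in memo:
--                     stack.append((child, False))
--
--         else:
--             moves = [1, 2, 3]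
--             can_win = False
--             winning_move = 0
--
--             for move in moves:
--                 child = pos + move
--                 childIsWinning, _ = memo[child]
--                 if not childIsWinning:
--                     can_win = True
--                     winning_move = move
--                     break
--
--             memo[pos] = (can_win, winning_move)
--
--     return memo[start_position], memo
-- ===== SOURCE B (Python) =====
-- def is_winning_position_iterative(start_position):
--     # direct backward tabulation instead of an explicit expand/pop stack DFS
--     memo = {pos: (False, 0) for pos in range(21, 25)}
--     for pos in range(20, start_position - 1, -1):
--         can_win, winning_move = False, 0
--         for move in (1, 2, 3):
--             if not memo[pos + move][0]:
--                 can_win, winning_move = True, move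
--                 break
--         memo[pos] = (can_win, winning_move)
--     return memo[start_position], memo
-- ===== Notes on version B (the rewrite author's own statement) =====
-- stated objective: simpler
-- what changed: Replaces the explicit expand/pop stack DFS over the memo with a direct backward tabulation loop from 20 down to start_position computing the same recurrence in one pass.
import Mathlib
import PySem

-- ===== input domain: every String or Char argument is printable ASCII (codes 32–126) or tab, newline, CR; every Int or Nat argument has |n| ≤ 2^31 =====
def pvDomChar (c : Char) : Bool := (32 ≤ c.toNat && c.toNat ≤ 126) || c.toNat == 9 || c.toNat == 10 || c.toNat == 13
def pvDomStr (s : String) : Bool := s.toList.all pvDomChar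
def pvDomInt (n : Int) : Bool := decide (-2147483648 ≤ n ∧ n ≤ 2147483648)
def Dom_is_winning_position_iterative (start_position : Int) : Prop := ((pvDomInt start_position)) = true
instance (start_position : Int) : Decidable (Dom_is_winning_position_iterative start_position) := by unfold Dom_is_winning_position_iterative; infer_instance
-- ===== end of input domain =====

-- B replaces A's explicit expand/pop stack DFS with a direct backward tabulation pass (simpler); same results on every terminating input.


-- ===== PORT A =====
-- inner 'for move in moves: … break' of the expanded branch: first move whose child is a losing position.
-- memo[child]: under Pre_ every child is present when this branch runs, so the getD default is never read.
def pvWinScanA (m : PySem.Dict Int (Bool × Int)) (pos : Int) : List Int → Bool × Int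
  | [] => (false, 0)
  | mv :: rest =>
    if !(m.getD (pos + mv) (true, 0)).1 then (true, mv) else pvWinScanA m pos rest

-- the 'while stack' loop; list head = top of the Python stack (append/pop act at the list end).
-- fuel bounds the iteration count: Python's loop never terminates for start_position > 24 (excluded by Pre_),
-- and under Pre_ the chosen fuel is proved sufficient, so the fuel-0 fallback is never reached.
def pvLoopA : Nat → List (Int × Bool) → PySem.Dict Int (Bool × Int) → PySem.Dict Int (Bool × Int)
  | _, [], m => m
  | 0, _ :: _, m => m
  | fuel+1, (pos, expanded) :: rest, m =>
    if m.contains pos then pvLoopA fuel rest m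
    else if !expanded then
      pvLoopA fuel
        ([(1:Int), 2, 3].foldl
          (fun st mv => if m.contains (pos + mv) then st else (pos + mv, false) :: st)
          ((pos, true) :: rest)) m
    else
      pvLoopA fuel rest (m.insert pos (pvWinScanA m pos [1, 2, 3]))

def is_winning_position_iterative (start_position : Int) : (Bool × Int) × (List (Int × Bool × Int)) :=
  let memo0 := (PySem.List.pyRange 21 25 1).foldl (fun m pos => m.insert pos (false, 0)) PySem.Dict.empty
  let memo := pvLoopA (4 * (25 - start_position).toNat + 10) [(start_position, false)] memo0
  (memo.getD start_position (false, 0), memo.items)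

-- ===== PORT B =====
def pvWinScanB (m : PySem.Dict Int (Bool × Int)) (pos : Int) : List Int → Bool × Int
  | [] => (false, 0)
  | mv :: rest =>
    if !(m.getD (pos + mv) (true, 0)).1 then (true, mv) else pvWinScanB m pos rest

def is_winning_position_iterative_alt (start_position : Int) : (Bool × Int) × (List (Int × Bool × Int)) :=
  let memo0 := (PySem.List.pyRange 21 25 1).foldl (fun m pos => m.insert pos (false, 0)) PySem.Dict.empty
  let memo := (PySem.List.pyRange 20 (start_position - 1) (-1)).foldl
      (fun m pos => m.insert pos (pvWinScanB m pos [1, 2, 3])) memo0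
  (memo.getD start_position (false, 0), memo.items)

-- ===== PRECONDITION & SPEC =====
-- Pre_ excludes exactly start_position > 24, where Python's A loops forever (the stack grows without
-- bound, so A never returns); A returns on every other input.
def Pre_is_winning_position_iterative (start_position : Int) : Prop := start_position ≤ 24
instance (start_position : Int) : Decidable (Pre_is_winning_position_iterative start_position) := by unfold Pre_is_winning_position_iterative; infer_instance
def pvWitness_is_winning_position_iterative : Int := 18

def Spec_is_winning_position_iterative (start_position : Int) (out : (Bool × Int) × (List (Int × Bool × Int))) : Prop := out = is_winning_position_iterative_alt start_position
instance (start_position : Int) (out : (Bool × Int) × (List (Int × Bool × Int))) : Decidable (Spec_is_winning_position_iterative start_position out) := by unfold Spec_is_winning_position_iterative; infer_instance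

-- ===== CLAIM (what is proved, stated in full; the proofs are below) =====
def Claim_equal_is_winning_position_iterative : Prop := ∀ (start_position : Int), Dom_is_winning_position_iterative start_position → Pre_is_winning_position_iterative start_position → Spec_is_winning_position_iterative start_position (is_winning_position_iterative start_position)

-- ===== LEMMAS AND PROOFS =====

-- the table of solved positions t..24 in A's/B's common insertion order, indexed by how many
-- positions below 21 it holds: pvTab n has keys 21..24 then 20, 19, …, 21-n
def pvTab : Nat → PySem.Dict Int (Bool × Int)
  | 0 => PySem.Dict.mk [(21, (false, 0)), (22, (false, 0)), (23, (false, 0)), (24, (false, 0))]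
  | n+1 => (pvTab n).insert (20 - (n : Int)) (pvWinScanB (pvTab n) (20 - (n : Int)) [1, 2, 3])

def pvMem (t : Int) : PySem.Dict Int (Bool × Int) := pvTab ((21 - t).toNat)

lemma pvScanAB (m : PySem.Dict Int (Bool × Int)) (p : Int) :
    ∀ l : List Int, pvWinScanA m p l = pvWinScanB m p l := by
  intro l; induction l with
  | nil => rfl
  | cons mv rest ih => simp [pvWinScanA, pvWinScanB, ih]

lemma pvLoopA_nil (fuel : Nat) (m : PySem.Dict Int (Bool × Int)) : pvLoopA fuel [] m = m := by
  cases fuel <;> rfl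

lemma pvLoopA_cons (fuel : Nat) (p : Int) (e : Bool) (rest : List (Int × Bool))
    (m : PySem.Dict Int (Bool × Int)) :
    pvLoopA (fuel + 1) ((p, e) :: rest) m =
      if m.contains p then pvLoopA fuel rest m
      else if !e then
        pvLoopA fuel
          ([(1:Int), 2, 3].foldl
            (fun st mv => if m.contains (p + mv) then st else (p + mv, false) :: st)
            ((p, true) :: rest)) m
      else pvLoopA fuel rest (m.insert p (pvWinScanA m p [1, 2, 3])) := rfl

lemma contains_pvTab : ∀ (n : Nat) (k : Int),
    (pvTab n).contains k = decide ((21 : Int) - n ≤ k ∧ k ≤ 24) := by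
  intro n
  induction n with
  | zero =>
    intro k
    simp only [pvTab, PySem.Dict.contains_mk, Nat.cast_zero]
    rw [Bool.eq_iff_iff]
    simp
    omega
  | succ n ih =>
    intro k
    simp only [pvTab, PySem.Dict.contains_insert, ih, Nat.cast_succ]
    rw [Bool.eq_iff_iff]
    simp
    omega

lemma contains_pvMem {t : Int} (ht : t ≤ 21) (k : Int) :
    (pvMem t).contains k = decide (t ≤ k ∧ k ≤ 24) := by
  have h : ((21 - t).toNat : Int) = 21 - t := by omega
  rw [pvMem, contains_pvTab, h]
  congr 1
  rw [eq_iff_iff]; constructor <;> (intro ⟨a, b⟩; exact ⟨by omega, b⟩)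

lemma pvMem_insert {p : Int} (hp : p ≤ 20) :
    (pvMem (p + 1)).insert p (pvWinScanA (pvMem (p + 1)) p [1, 2, 3]) = pvMem p := by
  have h1 : (21 - p).toNat = (20 - p).toNat + 1 := by omega
  have h2 : (21 - (p + 1)).toNat = (20 - p).toNat := by omega
  have h3 : (20 : Int) - ((20 - p).toNat : Int) = p := by omega
  rw [pvMem, pvMem, h1, h2, pvTab, h3, pvScanAB]

lemma pvStepT {p : Int} (hp : p ≤ 20) (fuel : Nat) (rest : List (Int × Bool)) :
    pvLoopA (fuel + 1) ((p, true) :: rest) (pvMem (p + 1)) = pvLoopA fuel rest (pvMem p) := by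
  have ht : p + 1 ≤ 21 := by omega
  have hc : (pvMem (p + 1)).contains p = false := by
    rw [contains_pvMem ht]; simp
  rw [pvLoopA_cons, hc]
  simp only [Bool.false_eq_true, if_false, Bool.not_true]
  rw [pvMem_insert hp]

lemma pvLoopA_resolve : ∀ (k : Nat) (p t : Int), p ≤ 24 → t ≤ 21 → (t - p).toNat ≤ k →
    ∃ n : Nat, n ≤ 4 * (t - p).toNat + 1 ∧
      ∀ (fuel : Nat) (rest : List (Int × Bool)),
        pvLoopA (fuel + n) ((p, false) :: rest) (pvMem t) = pvLoopA fuel rest (pvMem (min p t)) := by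
  intro k
  induction k using Nat.strong_induction_on with
  | _ k ih =>
  intro p t hp ht hk
  by_cases hpt : t ≤ p
  · refine ⟨1, by omega, ?_⟩
    intro fuel rest
    have hc : (pvMem t).contains p = true := by
      rw [contains_pvMem ht]; simp; omega
    rw [pvLoopA_cons, hc, if_pos rfl, min_eq_right hpt]
  · rw [not_le] at hpt
    have hc : (pvMem t).contains p = false := by
      rw [contains_pvMem ht]; simp; omega
    have hmin : min p t = p := min_eq_left (le_of_lt hpt)
    by_cases h1 : t = p + 1
    · -- all three children already in the memo
      have hc1 : (pvMem t).contains (p + 1) = true := by rw [contains_pvMem ht]; simp; omega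
      have hc2 : (pvMem t).contains (p + 2) = true := by rw [contains_pvMem ht]; simp; omega
      have hc3 : (pvMem t).contains (p + 3) = true := by rw [contains_pvMem ht]; simp; omega
      refine ⟨2, by omega, ?_⟩
      intro fuel rest
      have e0 : fuel + 2 = (fuel + 1) + 1 := by omega
      rw [e0, pvLoopA_cons, hc]
      simp only [Bool.false_eq_true, if_false, Bool.not_false, if_true, List.foldl, hc1, hc2, hc3]
      rw [hmin, h1]
      exact pvStepT (p := p) (by omega) fuel rest
    · by_cases h2 : t = p + 2
      · have hc1 : (pvMem t).contains (p + 1) = false := by rw [contains_pvMem ht]; simp; omega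
        have hc2 : (pvMem t).contains (p + 2) = true := by rw [contains_pvMem ht]; simp; omega
        have hc3 : (pvMem t).contains (p + 3) = true := by rw [contains_pvMem ht]; simp; omega
        obtain ⟨n1, hb1, hr1⟩ := ih (k - 1) (by omega) (p + 1) t (by omega) ht (by omega)
        rw [min_eq_left (by omega)] at hr1
        refine ⟨1 + n1 + 1, by omega, ?_⟩
        intro fuel rest
        have e0 : fuel + (1 + n1 + 1) = ((fuel + 1) + n1) + 1 := by omega
        rw [e0, pvLoopA_cons, hc]
        simp only [Bool.false_eq_true, if_false, Bool.not_false, if_true, List.foldl, hc1, hc2, hc3]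
        rw [hr1 (fuel + 1) ((p, true) :: rest), hmin]
        exact pvStepT (p := p) (by omega) fuel rest
      · by_cases h3 : t = p + 3
        · have hc1 : (pvMem t).contains (p + 1) = false := by rw [contains_pvMem ht]; simp; omega
          have hc2 : (pvMem t).contains (p + 2) = false := by rw [contains_pvMem ht]; simp; omega
          have hc3 : (pvMem t).contains (p + 3) = true := by rw [contains_pvMem ht]; simp; omega
          obtain ⟨n2, hb2, hr2⟩ := ih (k - 1) (by omega) (p + 2) t (by omega) ht (by omega)
          rw [min_eq_left (by omega)] at hr2
          obtain ⟨n1, hb1, hr1⟩ := ih (k - 1) (by omega) (p + 1) (p + 2) (by omega) (by omega) (by omega)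
          rw [min_eq_left (by omega)] at hr1
          refine ⟨1 + n2 + n1 + 1, by omega, ?_⟩
          intro fuel rest
          have e0 : fuel + (1 + n2 + n1 + 1) = (((fuel + 1) + n1) + n2) + 1 := by omega
          rw [e0, pvLoopA_cons, hc]
          simp only [Bool.false_eq_true, if_false, Bool.not_false, if_true, List.foldl, hc1, hc2, hc3]
          rw [hr2 ((fuel + 1) + n1) ((p + 1, false) :: (p, true) :: rest)]
          rw [hr1 (fuel + 1) ((p, true) :: rest)]
          rw [hmin]; exact pvStepT (p := p) (by omega) fuel rest
        · -- p + 4 ≤ t: all three children are pushed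
          have hc1 : (pvMem t).contains (p + 1) = false := by rw [contains_pvMem ht]; simp; omega
          have hc2 : (pvMem t).contains (p + 2) = false := by rw [contains_pvMem ht]; simp; omega
          have hc3 : (pvMem t).contains (p + 3) = false := by rw [contains_pvMem ht]; simp; omega
          obtain ⟨n3, hb3, hr3⟩ := ih (k - 1) (by omega) (p + 3) t (by omega) ht (by omega)
          rw [min_eq_left (by omega)] at hr3
          obtain ⟨n2, hb2, hr2⟩ := ih (k - 1) (by omega) (p + 2) (p + 3) (by omega) (by omega) (by omega)
          rw [min_eq_left (by omega)] at hr2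
          obtain ⟨n1, hb1, hr1⟩ := ih (k - 1) (by omega) (p + 1) (p + 2) (by omega) (by omega) (by omega)
          rw [min_eq_left (by omega)] at hr1
          refine ⟨1 + n3 + n2 + n1 + 1, by omega, ?_⟩
          intro fuel rest
          have e0 : fuel + (1 + n3 + n2 + n1 + 1) = ((((fuel + 1) + n1) + n2) + n3) + 1 := by omega
          rw [e0, pvLoopA_cons, hc]
          simp only [Bool.false_eq_true, if_false, Bool.not_false, if_true, List.foldl, hc1, hc2, hc3]
          rw [hr3 (((fuel + 1) + n1) + n2) ((p + 2, false) :: (p + 1, false) :: (p, true) :: rest)]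
          rw [hr2 ((fuel + 1) + n1) ((p + 1, false) :: (p, true) :: rest)]
          rw [hr1 (fuel + 1) ((p, true) :: rest)]
          rw [hmin]; exact pvStepT (p := p) (by omega) fuel rest

lemma pvB_fold : ∀ n : Nat,
    ((List.range n).map (fun k : Nat => (20 : Int) - (k : Int))).foldl
      (fun m pos => m.insert pos (pvWinScanB m pos [1, 2, 3])) (pvTab 0) = pvTab n := by
  intro n
  induction n with
  | zero => rfl
  | succ n ih =>
    rw [List.range_succ, List.map_append, List.foldl_append, ih]
    rfl

-- ===== VERDICT (by name: the statement is the Claim_ definition above) =====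
theorem is_winning_position_iterative_spec : Claim_equal_is_winning_position_iterative := by
  intro s hdom hpre
  unfold Pre_is_winning_position_iterative at hpre
  unfold Spec_is_winning_position_iterative
  unfold is_winning_position_iterative is_winning_position_iterative_alt
  have hbase : (PySem.List.pyRange 21 25 1).foldl
      (fun m pos => m.insert pos ((false : Bool), (0 : Int))) PySem.Dict.empty = pvTab 0 := by rfl
  simp only [hbase]
  have hm21 : pvTab 0 = pvMem 21 := by rfl
  obtain ⟨n, hnb, hrun⟩ := pvLoopA_resolve ((21 - s).toNat) s 21 hpre (le_refl _) (le_refl _)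
  have hF : 4 * (25 - s).toNat + 10 = (4 * (25 - s).toNat + 10 - n) + n := by omega
  rw [hm21, hF, hrun (4 * (25 - s).toNat + 10 - n) [], pvLoopA_nil]
  rw [PySem.List.pyRange_neg_one]
  have harg : (20 - (s - 1)).toNat = (21 - s).toNat := by omega
  rw [harg, ← hm21, pvB_fold ((21 - s).toNat)]
  have hfin : pvMem (min s 21) = pvTab ((21 - s).toNat) := by
    unfold pvMem; congr 1; omega
  rw [hfin]
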